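-- pv_equiv track=rewrite | github.com/ipcoder/toolbox | algutils/src/algutils/regexp.py | _gpt_strip_verbose
-- ===== SOURCE A (Python) =====
-- def _gpt_strip_verbose(pattern):
--     """
--     How it works:
--      1. Tracking State:
--         The code uses two boolean flags:
--           - in_char_class to know when it’s inside a character class (so that spaces
--             or # characters there are left intact).
--           - escaped to ensure that characters preceded by a backslash
--             are not processed as potential comment or whitespace markers.
--
--      2. Skipping Comments and Whitespace:
--        Outside a character class, when encountering a #,
--        the loop skips all characters until the next newline.
--
--        Similarly, whitespace characters outside character classes are not added to the output.
--
--      3. Preserving Important Characters: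
--        All characters that are significant to the regex
--        (including escaped ones and those within character classes)
--        are appended to the result list.
--
--     **Caveats**
--
--     May fail on some edge cases, like nested constructs
--
--     :param pattern:
--     :return:
--     """
--
--     result = []
--     in_char_class = False
--     escaped = False
--     i = 0
--     while i < len(pattern):
--         char = pattern[i]
--         if escaped:
--             # If previous char was a backslash, keep this character.
--             result.append(char)
--             escaped = False
--         elif char == '\\':
--             # Mark the next character as escaped.
--             result.append(char)
--             escaped = True
--         elif char == '[':
--             in_char_class = True
--             result.append(char)
--         elif char == ']' and in_char_class:
--             in_char_class = False
--             result.append(char)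
--         elif char == '#' and not in_char_class:
--             # Skip the comment: ignore characters until the end of the line.
--             while i < len(pattern) and pattern[i] != "\n":
--                 i += 1
--             # Continue without appending the newline
--             # (or add it if you need to preserve line breaks)
--         elif char in (' ', '\n', '\t') and not in_char_class:
--             pass  # Skip free-space when outside a character class.
--         else:
--             result.append(char)
--         i += 1
--     return ''.join(result)
-- ===== SOURCE B (Python) =====
-- def _gpt_strip_verbose(pattern):
--     # One-pass tokenizer: consume whole tokens (escape pair, full char class,
--     # comment line, single char) instead of a flag-based state machine.
--     out = []
--     n = len(pattern)
--     i = 0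
--     while i < n:
--         c = pattern[i]
--         if c == '\\':
--             out.append(pattern[i:i + 2])
--             i += 2
--         elif c == '[':
--             j = i + 1
--             while j < n:
--                 if pattern[j] == '\\':
--                     j += 2
--                 elif pattern[j] == ']':
--                     j += 1
--                     break
--                 else:
--                     j += 1
--             out.append(pattern[i:j])
--             i = j
--         elif c == '#':
--             while i < n and pattern[i] != '\n':
--                 i += 1
--             i += 1
--         elif c in ' \n\t':
--             i += 1
--         else:
--             out.append(c)
--             i += 1
--     return ''.join(out)
-- ===== Notes on version B (the rewrite author's own statement) =====
-- stated objective: alternative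
-- what changed: Replaces A's character-by-character flag-based state machine (in_char_class/escaped booleans) with a one-pass tokenizer that consumes whole tokens at a time: an escape pair, an entire character class, a comment line, a whitespace char, or a literal char.
import Mathlib
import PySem

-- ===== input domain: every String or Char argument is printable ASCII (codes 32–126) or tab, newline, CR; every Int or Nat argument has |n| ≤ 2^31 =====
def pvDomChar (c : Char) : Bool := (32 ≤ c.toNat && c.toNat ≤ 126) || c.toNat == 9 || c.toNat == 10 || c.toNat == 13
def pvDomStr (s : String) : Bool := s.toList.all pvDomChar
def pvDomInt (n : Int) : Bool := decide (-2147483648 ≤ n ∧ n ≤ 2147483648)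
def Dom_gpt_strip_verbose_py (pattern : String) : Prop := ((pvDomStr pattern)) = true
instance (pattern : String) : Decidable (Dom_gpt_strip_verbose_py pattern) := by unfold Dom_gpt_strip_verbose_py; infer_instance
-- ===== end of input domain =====

-- B replaces A's flag-based state machine by a one-pass tokenizer that consumes
-- whole tokens (escape pair, full character class, comment line, single char); alternative decomposition, same cost.


-- B replaces A's flag-based state machine by a one-pass tokenizer that consumes
-- whole tokens (escape pair, full character class, comment line, single char); alternative decomposition, same cost.

-- ===== PORT A =====
-- A's inner comment loop: advance i while pattern[i] != '\n', then i += 1 (drops the newline).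
def pvSkipComment (l : List Char) : List Char := (l.dropWhile (· ≠ '\n')).drop 1

theorem pvSkipComment_len_le (l : List Char) : (pvSkipComment l).length ≤ l.length := by
  simp only [pvSkipComment, List.length_drop]
  exact le_trans (Nat.sub_le _ _) (List.length_dropWhile_le _ _)

-- the while loop of A: state = remaining chars, in_char_class, escaped
def pvAGo : List Char → Bool → Bool → List Char
  | [], _, _ => []
  | c :: rest, inCC, esc =>
    if esc then c :: pvAGo rest inCC false
    else if c = '\\' then c :: pvAGo rest inCC true
    else if c = '[' then c :: pvAGo rest true false
    else if c = ']' ∧ inCC then c :: pvAGo rest false false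
    else if c = '#' ∧ ¬ inCC then pvAGo (pvSkipComment rest) inCC false
    else if (c = ' ' ∨ c = '\n' ∨ c = '\t') ∧ ¬ inCC then pvAGo rest inCC false
    else c :: pvAGo rest inCC false
termination_by l => l.length
decreasing_by all_goals simp <;> exact pvSkipComment_len_le _

def gpt_strip_verbose_py (pattern : String) : String :=
  String.ofList (pvAGo pattern.toList false false)

-- ===== PORT B =====
-- B's char-class scan: from just after '[', returns (class token, remainder)
def pvScanClass : List Char → List Char × List Char
  | [] => ([], [])
  | c :: rest =>
    if c = '\\' then
      let p := pvScanClass (rest.drop 1)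
      (c :: (rest.take 1 ++ p.1), p.2)
    else if c = ']' then ([c], rest)
    else
      let p := pvScanClass rest
      (c :: p.1, p.2)
termination_by l => l.length
decreasing_by all_goals simp

theorem pvScanClass_len_le (l : List Char) : (pvScanClass l).2.length ≤ l.length := by
  induction l using pvScanClass.induct with
  | case1 => simp [pvScanClass]
  | case2 rest ih =>
      simp only [pvScanClass]
      exact le_trans ih (by simp only [List.length_drop, List.length_cons]; omega)
  | case3 rest h => simp [pvScanClass]
  | case4 c rest h1 h2 ih =>
      simp only [pvScanClass, if_neg h1, if_neg h2, List.length_cons]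
      exact Nat.le_succ_of_le ih

-- B's main loop: consume one token per step
def pvBGo : List Char → List Char
  | [] => []
  | c :: rest =>
    if c = '\\' then c :: (rest.take 1 ++ pvBGo (rest.drop 1))
    else if c = '[' then
      let p := pvScanClass rest
      c :: (p.1 ++ pvBGo p.2)
    else if c = '#' then pvBGo (pvSkipComment rest)
    else if c = ' ' ∨ c = '\n' ∨ c = '\t' then pvBGo rest
    else c :: pvBGo rest
termination_by l => l.length
decreasing_by all_goals simp <;>
  first
  | exact pvScanClass_len_le _
  | exact pvSkipComment_len_le _

def gpt_strip_verbose_py_alt (pattern : String) : String :=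
  String.ofList (pvBGo pattern.toList)

-- ===== PRECONDITION & SPEC =====
def Spec_gpt_strip_verbose_py (pattern : String) (out : String) : Prop := out = gpt_strip_verbose_py_alt pattern
instance (pattern : String) (out : String) : Decidable (Spec_gpt_strip_verbose_py pattern out) := by unfold Spec_gpt_strip_verbose_py; infer_instance

-- ===== CLAIM (what is proved, stated in full; the proofs are below) =====
def Claim_equal_gpt_strip_verbose_py : Prop := ∀ (pattern : String), Dom_gpt_strip_verbose_py pattern → Spec_gpt_strip_verbose_py pattern (gpt_strip_verbose_py pattern)

-- ===== LEMMAS AND PROOFS =====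

-- in escaped state, A keeps the next char and resumes unescaped
theorem pvAGo_escaped (l : List Char) (inCC : Bool) :
    pvAGo l inCC true = l.take 1 ++ pvAGo (l.drop 1) inCC false := by
  cases l with
  | nil => simp [pvAGo]
  | cons c rest => simp [pvAGo]

-- inside a character class, A produces exactly B's class token then resumes outside
theorem pvAGo_class (l : List Char) :
    pvAGo l true false = (pvScanClass l).1 ++ pvAGo (pvScanClass l).2 false false := by
  induction l using pvScanClass.induct with
  | case1 => simp [pvAGo, pvScanClass]
  | case2 rest ih =>
      rw [List.drop_one] at ih
      simp [pvScanClass, pvAGo, pvAGo_escaped, ih]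
  | case3 rest h =>
      simp [pvScanClass, pvAGo, h]
  | case4 c rest h1 h2 ih =>
      simp [pvScanClass, pvAGo, h1, h2, ih]

theorem pvAGo_eq_pvBGo (l : List Char) : pvAGo l false false = pvBGo l := by
  induction l using pvBGo.induct with
  | case1 => simp [pvAGo, pvBGo]
  | case2 rest ih =>
      rw [List.drop_one] at ih
      simp [pvAGo, pvBGo, pvAGo_escaped, ih]
  | case3 rest p h ih =>
      simp only [p] at ih
      simp [pvAGo, pvBGo, pvAGo_class, ih]
  | case4 rest h1 h2 ih =>
      simp [pvAGo, pvBGo, h1, h2, ih]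
  | case5 c rest h1 h2 h3 h4 ih =>
      simp [pvAGo, pvBGo, h1, h2, h3, h4, ih]
  | case6 c rest h1 h2 h3 h4 ih =>
      simp [pvAGo, pvBGo, h1, h2, h3, h4, ih]

-- ===== VERDICT (by name: the statement is the Claim_ definition above) =====
theorem gpt_strip_verbose_py_spec : Claim_equal_gpt_strip_verbose_py := by
  intro pattern _
  unfold Spec_gpt_strip_verbose_py gpt_strip_verbose_py gpt_strip_verbose_py_alt
  rw [pvAGo_eq_pvBGo]
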